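-- pv_equiv track=rewrite | github.com/IIIT-Ranchi-CS2001/lab-codes-2023b-KUMAR-ABHISHEK-9430 | Lab_20_11.py | splt
-- ===== SOURCE A (Python) =====
-- def prime(x):
--     cnt = 0
--     for i in range(1,x+1):
--         if x % i==0:
--             cnt +=1
--     if cnt >2:
--         return False
--     else:
--         return True
--
-- def splt(lst):
--     prim = []
--     cmpst =[]
--     for num in lst:
--         if prime(num):
--             prim.append(num)
--         else:
--             cmpst.append(num)
--
--     return prim,cmpst
-- ===== SOURCE B (Python) =====
-- def _is_prime_like(x):
--     # divisor-count <= 2; matches A: True for x <= 1 (and 2, 3), trial division above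
--     if x < 4:
--         return True
--     if x % 2 == 0:
--         return False
--     d = 3
--     while d * d <= x:
--         if x % d == 0:
--             return False
--         d += 2
--     return True
--
-- def splt(lst):
--     prim = [n for n in lst if _is_prime_like(n)]
--     cmpst = [n for n in lst if not _is_prime_like(n)]
--     return prim, cmpst
-- ===== Notes on version B (the rewrite author's own statement) =====
-- stated objective: faster
-- what changed: Replace the O(x) divisor-counting primality test with trial division by odd numbers up to sqrt(x) (x<4 is classified 'prime' exactly as A does), and build the two lists with two filter passes instead of one append loop.
import Mathlib
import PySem

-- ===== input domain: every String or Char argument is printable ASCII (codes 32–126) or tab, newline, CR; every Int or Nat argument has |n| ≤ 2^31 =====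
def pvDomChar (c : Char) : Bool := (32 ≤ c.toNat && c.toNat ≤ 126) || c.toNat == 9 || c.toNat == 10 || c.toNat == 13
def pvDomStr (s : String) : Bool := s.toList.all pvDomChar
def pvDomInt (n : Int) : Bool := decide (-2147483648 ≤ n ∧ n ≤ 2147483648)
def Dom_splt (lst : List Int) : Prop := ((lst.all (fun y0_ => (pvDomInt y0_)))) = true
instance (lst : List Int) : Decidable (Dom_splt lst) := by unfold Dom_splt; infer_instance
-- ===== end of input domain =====

-- B replaces A's O(x) divisor-counting primality test by trial division by odd numbers up to sqrt(x): faster.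


-- ===== PORT A =====
def prime (x : Int) : Bool :=
  let cnt : Int :=
    (PySem.List.pyRange 1 (x + 1) 1).foldl
      (fun cnt i => if PySem.Int.mod x i == 0 then cnt + 1 else cnt) 0
  if cnt > 2 then false else true

def splt (lst : List Int) : List Int × List Int :=
  lst.foldl
    (fun (acc : List Int × List Int) num =>
      if prime num then (acc.1 ++ [num], acc.2) else (acc.1, acc.2 ++ [num]))
    ([], [])

-- ===== PORT B =====
-- termination fact for the trial-division loop, cited by name in decreasing_by
theorem trialLoop_measure_lt (x d : Int) (h : d * d ≤ x) :
    (x + 2 - (d + 2)).toNat < (x + 2 - d).toNat := by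
  have hdx : d ≤ x := by
    by_cases h0 : d ≤ 0
    · nlinarith [mul_self_nonneg d]
    · nlinarith
  omega

def trialLoop (x d : Int) : Bool :=
  if d * d ≤ x then
    if PySem.Int.mod x d == 0 then false
    else trialLoop x (d + 2)
  else true
termination_by (x + 2 - d).toNat
decreasing_by exact trialLoop_measure_lt x d (by assumption)

def isPrimeLike (x : Int) : Bool :=
  if x < 4 then true
  else if PySem.Int.mod x 2 == 0 then false
  else trialLoop x 3

def splt_alt (lst : List Int) : List Int × List Int :=
  (lst.filter (fun n => isPrimeLike n), lst.filter (fun n => !isPrimeLike n))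

-- ===== PRECONDITION & SPEC =====
def Spec_splt (lst : List Int) (out : List Int × List Int) : Prop := out = splt_alt lst
instance (lst : List Int) (out : List Int × List Int) : Decidable (Spec_splt lst out) := by unfold Spec_splt; infer_instance

-- ===== CLAIM (what is proved, stated in full; the proofs are below) =====
def Claim_equal_splt : Prop := ∀ (lst : List Int), Dom_splt lst → Spec_splt lst (splt lst)

-- ===== LEMMAS AND PROOFS =====

-- A's divisor count over range(1, x+1)
def divCount (x : Int) : Nat :=
  (PySem.List.pyRange 1 (x + 1) 1).countP (fun i => decide (i ∣ x))

theorem prime_eq_divCount (x : Int) : prime x = decide (divCount x ≤ 2) := by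
  unfold prime divCount
  rw [PySem.List.foldl_if_add_one]
  have hcong : (PySem.List.pyRange 1 (x + 1) 1).countP (fun i => PySem.Int.mod x i == 0)
      = (PySem.List.pyRange 1 (x + 1) 1).countP (fun i => decide (i ∣ x)) := by
    apply List.countP_congr
    intro i _
    simp [PySem.Int.mod_eq_zero_iff_dvd]
  rw [hcong]
  by_cases h : divCount x ≤ 2 <;> simp_all [divCount]

-- the filtered divisor list of A, with its two basic facts
theorem divCount_eq_length (x : Int) :
    divCount x = ((PySem.List.pyRange 1 (x + 1) 1).filter (fun i => decide (i ∣ x))).length := by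
  simp [divCount, List.countP_eq_length_filter]

theorem nodup_divList (x : Int) :
    ((PySem.List.pyRange 1 (x + 1) 1).filter (fun i => decide (i ∣ x))).Nodup :=
  (PySem.List.nodup_pyRange_one 1 (x+1)).filter _

theorem mem_divList (x d : Int) :
    d ∈ (PySem.List.pyRange 1 (x + 1) 1).filter (fun i => decide (i ∣ x)) ↔
      (1 ≤ d ∧ d < x + 1) ∧ d ∣ x := by
  simp [List.mem_filter, PySem.List.mem_pyRange_one]

-- a small divisor (2 ≤ m, m*m ≤ x) of x ≥ 4 forces at least three divisors: 1, m, x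
theorem three_divisors (x : Int) (hx : 4 ≤ x) (m : Int) (hm2 : 2 ≤ m)
    (hmm : m * m ≤ x) (hdvd : m ∣ x) : 3 ≤ divCount x := by
  have hmx : m < x := by nlinarith
  set f := (PySem.List.pyRange 1 (x + 1) 1).filter (fun i => decide (i ∣ x)) with hf
  have hsub : ({1, m, x} : Finset Int) ⊆ f.toFinset := by
    intro y hy
    simp only [Finset.mem_insert, Finset.mem_singleton] at hy
    rw [List.mem_toFinset, mem_divList]
    rcases hy with rfl | rfl | rfl
    · exact ⟨⟨le_refl 1, by omega⟩, one_dvd x⟩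
    · exact ⟨⟨by omega, by omega⟩, hdvd⟩
    · exact ⟨⟨by omega, by omega⟩, dvd_refl _⟩
  have hcard : ({1, m, x} : Finset Int).card = 3 :=
    Finset.card_eq_three.mpr ⟨1, m, x, by omega, by omega, by omega, rfl⟩
  have := Finset.card_le_card hsub
  rw [hcard, List.toFinset_card_of_nodup (nodup_divList x)] at this
  rw [divCount_eq_length, ← hf]
  exact this

-- conversely, more than two divisors yield a divisor m with m*m ≤ x
theorem small_div_of_divCount (x : Int) (hx : 4 ≤ x) (h3 : 3 ≤ divCount x) :
    ∃ m : Int, 2 ≤ m ∧ m * m ≤ x ∧ m ∣ x := by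
  by_contra hno
  push Not at hno
  set f := (PySem.List.pyRange 1 (x + 1) 1).filter (fun i => decide (i ∣ x)) with hf
  have hmem : ∀ d ∈ f, d = 1 ∨ d = x := by
    intro d hd
    rw [hf, mem_divList] at hd
    obtain ⟨⟨hd1, hdlt⟩, hdvd⟩ := hd
    by_contra hne
    push Not at hne
    have hd2 : 2 ≤ d := by omega
    have hdx : d < x := by omega
    rcases le_or_gt (d * d) x with hsm | hbig
    · exact hno d hd2 hsm hdvd
    · obtain ⟨q, hq⟩ := hdvd
      have hq1 : 1 ≤ q := by nlinarith
      have hq2 : 2 ≤ q := by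
        rcases lt_or_ge q 2 with h | h
        · interval_cases q; omega
        · exact h
      have hqq : q * q ≤ x := by nlinarith
      exact hno q hq2 hqq ⟨d, by rw [hq]; ring⟩
  have hsubf : f.toFinset ⊆ ({1, x} : Finset Int) := by
    intro y hy
    rw [List.mem_toFinset] at hy
    simp only [Finset.mem_insert, Finset.mem_singleton]
    exact hmem y hy
  have hle : f.length ≤ 2 := by
    have h1 := Finset.card_le_card hsubf
    have h2 : ({1, x} : Finset Int).card ≤ 2 :=
      le_trans (Finset.card_insert_le 1 {x}) (by simp)
    rw [List.toFinset_card_of_nodup (nodup_divList x)] at h1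
    rw [← hf] at h1
    omega
  rw [divCount_eq_length, ← hf] at h3
  omega

-- characterization of the trial-division loop (positive odd start)
theorem trialLoop_iff (n : Nat) : ∀ (x d : Int), (x + 2 - d).toNat ≤ n → 1 ≤ d → d % 2 = 1 →
    (trialLoop x d = true ↔ ∀ e : Int, d ≤ e → e * e ≤ x → e % 2 = 1 → ¬ e ∣ x) := by
  induction n with
  | zero =>
    intro x d hn hd1 hd
    have hxd : ¬ (d * d ≤ x) := by
      intro h
      have := trialLoop_measure_lt x d h
      omega
    rw [trialLoop, if_neg hxd]
    simp only [true_iff]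
    intro e he hee heo hdvd
    nlinarith
  | succ n ih =>
    intro x d hn hd1 hd
    rw [trialLoop]
    by_cases hdd : d * d ≤ x
    · rw [if_pos hdd]
      by_cases hm : (PySem.Int.mod x d == 0) = true
      · rw [if_pos hm]
        simp only [Bool.false_eq_true, false_iff]
        intro h
        exact h d le_rfl hdd hd (by simpa [PySem.Int.mod_eq_zero_iff_dvd] using hm)
      · rw [if_neg hm]
        have hrec := ih x (d + 2) (by have := trialLoop_measure_lt x d hdd; omega)
          (by omega) (by omega)
        rw [hrec]
        constructor
        · intro h e he hee heo hdvd
          rcases lt_or_ge e (d + 2) with hlt | hge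
          · have : e = d := by omega
            subst this
            exact hm (by simpa [PySem.Int.mod_eq_zero_iff_dvd] using hdvd)
          · exact h e hge hee heo hdvd
        · intro h e he hee heo hdvd
          exact h e (by omega) hee heo hdvd
    · rw [if_neg hdd]
      simp only [true_iff]
      intro e he hee heo hdvd
      nlinarith

-- the pivot: A's primality test and B's agree on every integer
theorem prime_eq_isPrimeLike (x : Int) : prime x = isPrimeLike x := by
  by_cases hx4 : x < 4
  · rw [isPrimeLike, if_pos hx4, prime_eq_divCount]
    rcases lt_or_ge x 1 with h | h
    · have hnil : PySem.List.pyRange 1 (x + 1) 1 = [] :=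
        PySem.List.pyRange_one_eq_nil (by omega)
      simp [divCount, hnil]
    · interval_cases x <;> decide
  · push Not at hx4
    rw [prime_eq_divCount, isPrimeLike, if_neg (by omega)]
    by_cases h2 : (PySem.Int.mod x 2 == 0) = true
    · rw [if_pos h2]
      have h2d : (2 : Int) ∣ x := by simpa [PySem.Int.mod_eq_zero_iff_dvd] using h2
      have h3 := three_divisors x hx4 2 (by omega) (by nlinarith) h2d
      have hgt : ¬ (divCount x ≤ 2) := by omega
      simp [hgt]
    · rw [if_neg h2]
      have hodd : x % 2 = 1 := by
        rw [PySem.Int.mod_eq_emod_of_pos (by omega)] at h2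
        simp only [beq_iff_eq] at h2
        omega
      have hiff := trialLoop_iff (x + 2 - 3).toNat x 3 (le_refl _) (by omega) (by decide)
      have hmain : divCount x ≤ 2 ↔ trialLoop x 3 = true := by
        rw [hiff]
        constructor
        · intro hle e he3 hee heo hdvd
          have := three_divisors x hx4 e (by omega) hee hdvd
          omega
        · intro h
          by_contra hgt
          push Not at hgt
          obtain ⟨m, hm2, hmm, hmdvd⟩ := small_div_of_divCount x hx4 (by omega)
          rcases Int.emod_two_eq_zero_or_one m with hme | hmo
          · have h2m : (2 : Int) ∣ m := by omega
            have h2x : (2 : Int) ∣ x := dvd_trans h2m hmdvd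
            omega
          · exact h m (by omega) hmm hmo hmdvd
      cases htl : trialLoop x 3 <;> simp_all
-- the split loop: two independent accumulators, each an append-filter
theorem splt_eq (lst : List Int) : splt lst = splt_alt lst := by
  unfold splt splt_alt
  have hfun : (fun (acc : List Int × List Int) num =>
      if prime num then (acc.1 ++ [num], acc.2) else (acc.1, acc.2 ++ [num]))
      = (fun (s : List Int × List Int) e =>
          ((fun a n => if prime n then a ++ [n] else a) s.1 e,
           (fun a n => if !prime n then a ++ [n] else a) s.2 e)) := by
    funext acc num
    by_cases h : prime num <;> simp [h]
  rw [hfun, PySem.List.foldl_prod_mk (f := fun a n => if prime n then a ++ [n] else a)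
    (g := fun a n => if !prime n then a ++ [n] else a)]
  rw [PySem.List.foldl_append_if_eq_filter, PySem.List.foldl_append_if_eq_filter]
  simp only [List.nil_append, Prod.mk.injEq]
  constructor <;> apply List.filter_congr <;> intro a _ <;>
    simp [prime_eq_isPrimeLike]

-- ===== VERDICT (by name: the statement is the Claim_ definition above) =====
theorem splt_spec : Claim_equal_splt := by
  intro lst _
  unfold Spec_splt
  exact splt_eq lst
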